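-- pv_equiv track=rewrite | github.com/klbaker/battleship | my_module/functions.py | boat_coords
-- ===== SOURCE A (Python) =====
-- ship_size = {"battleship": 4, "submarine": 3, "destroyer": 3, "patrol boat": 2}
--
-- def boat_coords(boat, direction, start_x, start_y):
--     """Return all coordinates of the boat given it's type, direction, and back.
--
--     Parameters
--     ----------
--     boat : string
--         The type of boat
--     direction : string
--         The direction the boat is facing
--     start_x : int
--         The column the back of the boat is at
--     start_y : int
--         The row the back of the boat is on
--
--     Returns
--     -------
--     coords : list of tuples
--         The list of points the given boat is at
--     """
--     coords = [(start_x, start_y)]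
--
--     for i in range(1, ship_size[boat]):
--         if direction == "left":
--             new_x = coords[0][0] - i
--             y_loc = coords[0][1]
--             coords.append((new_x, y_loc))
--
--         elif direction =="right":
--             new_x = coords[0][0] + i
--             y_loc = coords[0][1]
--             coords.append((new_x, y_loc))
--
--         elif direction == "down":
--             new_y = coords[0][1] + i
--             x_loc = coords[0][0]
--             coords.append((x_loc, new_y))
--
--         else:
--             new_y = coords[0][1] - i
--             x_loc = coords[0][0]
--             coords.append((x_loc, new_y))
--
--     return coords
-- ===== SOURCE B (Python) =====
-- ship_size = {"battleship": 4, "submarine": 3, "destroyer": 3, "patrol boat": 2}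
--
-- def _step(direction, x, y):
--     """Successor cell of (x, y) in the given direction ('up' and anything else = up)."""
--     if direction == "left":
--         return x - 1, y
--     if direction == "right":
--         return x + 1, y
--     if direction == "down":
--         return x, y + 1
--     return x, y - 1
--
-- def boat_coords(boat, direction, start_x, start_y):
--     def walk(x, y, k):
--         if k == 0:
--             return []
--         nx, ny = _step(direction, x, y)
--         return [(x, y)] + walk(nx, ny, k - 1)
--     return walk(start_x, start_y, ship_size[boat])
-- ===== Notes on version B (the rewrite author's own statement) =====
-- stated objective: alternative
-- what changed: B builds the list by structural recursion that steps cell-by-cell from the previous cell (each coordinate is the successor of the last, consed front-to-back), whereas A iterates an index and computes every cell as an i-offset from the re-read first element coords[0] while appending; Pre_ excludes boats absent from ship_size, on which both raise KeyError.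
import Mathlib
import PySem

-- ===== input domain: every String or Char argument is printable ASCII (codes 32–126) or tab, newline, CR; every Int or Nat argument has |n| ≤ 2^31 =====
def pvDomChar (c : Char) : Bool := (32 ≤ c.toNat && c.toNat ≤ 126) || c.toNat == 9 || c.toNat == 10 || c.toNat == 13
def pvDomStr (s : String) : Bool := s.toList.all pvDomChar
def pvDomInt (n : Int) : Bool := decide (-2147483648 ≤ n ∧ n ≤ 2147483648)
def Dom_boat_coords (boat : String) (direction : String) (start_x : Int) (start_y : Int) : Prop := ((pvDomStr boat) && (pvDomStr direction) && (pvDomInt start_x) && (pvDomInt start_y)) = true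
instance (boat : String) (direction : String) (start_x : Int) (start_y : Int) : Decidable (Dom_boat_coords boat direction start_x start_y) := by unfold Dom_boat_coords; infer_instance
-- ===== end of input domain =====

-- B replaces A's indexed offsets-from-coords[0] loop by a structural recursion that steps cell-by-cell from the previous cell (alternative decomposition, same cost).

-- ===== PORT A =====
-- module-level dict ship_size
def shipSize : PySem.Dict String Int :=
  (((PySem.Dict.empty.insert "battleship" 4).insert "submarine" 3).insert "destroyer" 3).insert "patrol boat" 2

def boat_coords (boat : String) (direction : String) (start_x : Int) (start_y : Int) : List (Int × Int) :=
  -- coords = [(start_x, start_y)]; for i in range(1, ship_size[boat]): branch on direction, append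
  -- (ship_size[boat] is defined under Pre_; getD 0 unreachable there)
  let n := (shipSize.get? boat).getD 0
  (PySem.List.pyRange 1 n 1).foldl
    (fun coords i =>
      -- coords[0] — coords is never empty, so the default is unreachable
      let c0 := (PySem.List.pyGet? coords 0).getD (0, 0)
      if direction = "left" then
        coords ++ [(c0.1 - i, c0.2)]
      else if direction = "right" then
        coords ++ [(c0.1 + i, c0.2)]
      else if direction = "down" then
        coords ++ [(c0.1, c0.2 + i)]
      else
        coords ++ [(c0.1, c0.2 - i)])
    [(start_x, start_y)]

-- ===== PORT B =====
-- _step(direction, x, y)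
def stepDir (direction : String) (x y : Int) : Int × Int :=
  if direction = "left" then (x - 1, y)
  else if direction = "right" then (x + 1, y)
  else if direction = "down" then (x, y + 1)
  else (x, y - 1)

-- walk(x, y, k): cons (x,y) onto the walk from its successor cell
def walkB (direction : String) (x y : Int) : Nat → List (Int × Int)
  | 0 => []
  | k + 1 =>
      let p := stepDir direction x y
      (x, y) :: walkB direction p.1 p.2 k

def boat_coords_alt (boat : String) (direction : String) (start_x : Int) (start_y : Int) : List (Int × Int) :=
  walkB direction start_x start_y ((shipSize.get? boat).getD 0).toNat

-- ===== PRECONDITION & SPEC =====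
-- Pre_ excludes boats absent from ship_size, on which A (and B) raise KeyError.
def Pre_boat_coords (boat : String) (direction : String) (start_x : Int) (start_y : Int) : Prop :=
  boat = "battleship" ∨ boat = "submarine" ∨ boat = "destroyer" ∨ boat = "patrol boat"
instance (boat : String) (direction : String) (start_x : Int) (start_y : Int) : Decidable (Pre_boat_coords boat direction start_x start_y) := by unfold Pre_boat_coords; infer_instance

def pvWitness_boat_coords : String × String × Int × Int := ("submarine", "left", 2, 3)

def Spec_boat_coords (boat : String) (direction : String) (start_x : Int) (start_y : Int) (out : List (Int × Int)) : Prop := out = boat_coords_alt boat direction start_x start_y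
instance (boat : String) (direction : String) (start_x : Int) (start_y : Int) (out : List (Int × Int)) : Decidable (Spec_boat_coords boat direction start_x start_y out) := by unfold Spec_boat_coords; infer_instance

-- ===== CLAIM =====
def Claim_equal_boat_coords : Prop := ∀ (boat : String) (direction : String) (start_x : Int) (start_y : Int), Dom_boat_coords boat direction start_x start_y → Pre_boat_coords boat direction start_x start_y → Spec_boat_coords boat direction start_x start_y (boat_coords boat direction start_x start_y)

-- ===== LEMMAS AND PROOFS =====

-- for each of the four fixed boat sizes, after deciding the direction branches both sides
-- reduce to the same concrete list of at most four cells
set_option maxHeartbeats 2000000 in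
lemma agree_fixed (boat direction : String) (sx sy : Int)
    (hb : boat = "battleship" ∨ boat = "submarine" ∨ boat = "destroyer" ∨ boat = "patrol boat") :
    boat_coords boat direction sx sy = boat_coords_alt boat direction sx sy := by
  by_cases hl : direction = "left"
  · subst hl
    rcases hb with h | h | h | h <;> subst h <;>
      simp [boat_coords, boat_coords_alt, shipSize, walkB, stepDir, PySem.Dict.get?,
        PySem.Dict.insert, PySem.Dict.empty, PySem.List.pyRange, PySem.List.pyGet?,
        PySem.List.pyIdx?, List.range_succ, List.find?] <;> ring_nf <;> simp
  by_cases hr : direction = "right"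
  · subst hr
    rcases hb with h | h | h | h <;> subst h <;>
      simp [boat_coords, boat_coords_alt, shipSize, walkB, stepDir, PySem.Dict.get?,
        PySem.Dict.insert, PySem.Dict.empty, PySem.List.pyRange, PySem.List.pyGet?,
        PySem.List.pyIdx?, List.range_succ, List.find?, hl] <;> ring_nf <;> simp
  by_cases hd : direction = "down"
  · subst hd
    rcases hb with h | h | h | h <;> subst h <;>
      simp [boat_coords, boat_coords_alt, shipSize, walkB, stepDir, PySem.Dict.get?,
        PySem.Dict.insert, PySem.Dict.empty, PySem.List.pyRange, PySem.List.pyGet?,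
        PySem.List.pyIdx?, List.range_succ, List.find?, hl, hr] <;> ring_nf <;> simp
  · rcases hb with h | h | h | h <;> subst h <;>
      simp [boat_coords, boat_coords_alt, shipSize, walkB, stepDir, PySem.Dict.get?,
        PySem.Dict.insert, PySem.Dict.empty, PySem.List.pyRange, PySem.List.pyGet?,
        PySem.List.pyIdx?, List.range_succ, List.find?, hl, hr, hd] <;> ring_nf <;> simp

-- ===== VERDICT =====
theorem boat_coords_spec : Claim_equal_boat_coords := by
  intro boat direction sx sy _ hpre
  exact agree_fixed boat direction sx sy hpre
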